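-- pv_equiv track=rewrite | github.com/pypi-data/pypi-mirror-257 | packages/pchjlib/pchjlib-0.0.3.2-py3-none-any.whl/pchjlib.py | tao_danh_sach_quy_luat_1
-- ===== SOURCE A (Python) =====
-- def tao_danh_sach_quy_luat_1(number):
--     def ho_tro(number):
--         if number == 1:
--             return 1
--         socantim = 1
--         vi_tri = 0
--         for i in range(1, 1000):
--             socantim = (socantim // i + 1) * i
--             vi_tri += 1
--             if vi_tri == number:
--                 return socantim
--             for _ in range(0, i - 1):
--                 socantim += i
--                 vi_tri += 1
--                 if vi_tri == number:
--                     return socantim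
--
--     return [ho_tro(i) for i in range(1, number + 1)]
-- ===== SOURCE B (Python) =====
-- def tao_danh_sach_quy_luat_1(number):
--     # Single forward pass: generate the sequence once, appending each term as
--     # produced, instead of rerunning the generator from scratch for every index.
--     if number <= 0:
--         return []
--     out = [1]
--     s, i = 2, 2
--     while len(out) < number:
--         s = (s // i + 1) * i
--         out.append(s)
--         for _ in range(i - 1):
--             if len(out) >= number:
--                 break
--             s += i
--             out.append(s)
--         i += 1
--     return out
-- ===== Notes on version B (the rewrite author's own statement) =====
-- stated objective: faster
-- what changed: A recomputes the sequence generator from scratch for every index (ho_tro(i) for each i), O(n^2); B generates the sequence once in a single forward pass, appending each term as it is produced, O(n).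
import Mathlib
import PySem

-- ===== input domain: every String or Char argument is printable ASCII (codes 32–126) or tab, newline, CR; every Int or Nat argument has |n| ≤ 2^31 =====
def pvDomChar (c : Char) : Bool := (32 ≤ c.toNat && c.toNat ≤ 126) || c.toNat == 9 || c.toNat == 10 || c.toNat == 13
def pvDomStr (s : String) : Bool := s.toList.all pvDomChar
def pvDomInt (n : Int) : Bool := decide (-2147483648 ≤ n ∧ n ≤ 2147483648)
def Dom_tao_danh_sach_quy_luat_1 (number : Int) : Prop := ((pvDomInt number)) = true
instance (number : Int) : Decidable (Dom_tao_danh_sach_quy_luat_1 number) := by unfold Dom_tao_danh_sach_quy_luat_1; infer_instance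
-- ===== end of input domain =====

-- B replaces A's per-index rerun of the generator (O(n^2)) by one forward pass that
-- appends each term as it is produced (O(n)); measured faster, asymptotic mechanism.

-- ===== PORT A =====
-- inner 'for _ in range(0, i - 1)' loop of ho_tro: returns .inl on early return,
-- .inr (socantim, vi_tri) when the inner loop finishes.
def hoTroInner (k : Nat) (socantim vi_tri i target : Int) : Int ⊕ (Int × Int) :=
  match k with
  | 0 => Sum.inr (socantim, vi_tri)
  | k' + 1 =>
      let s := socantim + i
      let v := vi_tri + 1
      if v == target then Sum.inl s else hoTroInner k' s v i target

-- outer 'for i in range(1, 1000)' loop of ho_tro over the remaining range list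
def hoTroGo (l : List Int) (socantim vi_tri target : Int) : Option Int :=
  match l with
  | [] => none   -- loop exhausted: Python's ho_tro falls off the end and returns None
  | i :: rest =>
      let s := (PySem.Int.floordiv socantim i + 1) * i
      let v := vi_tri + 1
      if v == target then some s
      else
        match hoTroInner (i - 1).toNat s v i target with
        | Sum.inl r => some r
        | Sum.inr (s', v') => hoTroGo rest s' v' target

def hoTro (number : Int) : Option Int :=
  if number == 1 then some 1
  else hoTroGo (PySem.List.pyRange 1 1000 1) 1 0 number

-- '.getD 0' realises the List Int signature; under Pre_ hoTro is never none.
def tao_danh_sach_quy_luat_1 (number : Int) : List Int :=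
  (PySem.List.pyRange 1 (number + 1) 1).map (fun i => (hoTro i).getD 0)

-- ===== PORT B =====
-- B's while-loop: r = number - len(out) terms still to produce; altInner is the
-- inner 'for _ in range(i - 1)' with its 'if len(out) >= number: break'.
mutual
def altOuter (r : Nat) (s i : Int) : List Int :=
  match r with
  | 0 => []
  | r' + 1 =>
      let s1 := (PySem.Int.floordiv s i + 1) * i
      s1 :: altInner (i - 1).toNat r' s1 i
  termination_by (r, 0)
def altInner (k r : Nat) (s i : Int) : List Int :=
  match k with
  | 0 => altOuter r s (i + 1)
  | k' + 1 =>
      match r with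
      | 0 => []
      | r' + 1 => (s + i) :: altInner k' r' (s + i) i
  termination_by (r, 1)
end

def tao_danh_sach_quy_luat_1_alt (number : Int) : List Int :=
  if number ≤ 0 then [] else 1 :: altOuter (number - 1).toNat 2 2

-- ===== PRECONDITION & SPEC =====
-- For number > 499500 ho_tro's 'for i in range(1, 1000)' runs out and A's list ends in
-- None values, which is not a list of ints; exactly those inputs are excluded.
def Pre_tao_danh_sach_quy_luat_1 (number : Int) : Prop := number ≤ 499500
instance (number : Int) : Decidable (Pre_tao_danh_sach_quy_luat_1 number) := by unfold Pre_tao_danh_sach_quy_luat_1; infer_instance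
def pvWitness_tao_danh_sach_quy_luat_1 : Int := 7
def Spec_tao_danh_sach_quy_luat_1 (number : Int) (out : List Int) : Prop := out = tao_danh_sach_quy_luat_1_alt number
instance (number : Int) (out : List Int) : Decidable (Spec_tao_danh_sach_quy_luat_1 number out) := by unfold Spec_tao_danh_sach_quy_luat_1; infer_instance

-- ===== CLAIM (what is proved, stated in full; the proofs are below) =====
def Claim_equal_tao_danh_sach_quy_luat_1 : Prop := ∀ (number : Int), Dom_tao_danh_sach_quy_luat_1 number → Pre_tao_danh_sach_quy_luat_1 number → Spec_tao_danh_sach_quy_luat_1 number (tao_danh_sach_quy_luat_1 number)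

-- ===== LEMMAS AND PROOFS =====

theorem length_alt (r : Nat) :
    (∀ s i, (altOuter r s i).length = r) ∧ (∀ k s i, (altInner k r s i).length = r) := by
  induction r using Nat.strong_induction_on with
  | _ r ih =>
    have hout : ∀ s i, (altOuter r s i).length = r := by
      intro s i
      cases r with
      | zero => simp [altOuter]
      | succ r' => simp [altOuter]; exact (ih r' (by omega)).2 _ _ _
    refine ⟨hout, ?_⟩
    intro k s i
    cases k with
    | zero => simpa [altInner] using hout s (i + 1)
    | succ k' =>
      cases r with
      | zero => simp [altInner]
      | succ r' => simp [altInner]; exact (ih r' (by omega)).2 k' _ _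

theorem key_all (r : Nat) :
    (∀ (s i v : Int) (j : Nat), j < r → 1 ≤ i → 2 * (r : Int) ≤ (999 + i) * (1000 - i) →
      hoTroGo (PySem.List.pyRange i 1000 1) s v (v + j + 1) = (altOuter r s i)[j]?)
    ∧ (∀ (k : Nat) (s i v : Int) (j : Nat), j < r → 1 ≤ i →
        2 * (r : Int) ≤ 2 * (k : Int) + (1000 + i) * (999 - i) →
      (match hoTroInner k s v i (v + j + 1) with
       | Sum.inl x => some x
       | Sum.inr (s', v') => hoTroGo (PySem.List.pyRange (i + 1) 1000 1) s' v' (v + j + 1))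
        = (altInner k r s i)[j]?) := by
  induction r using Nat.strong_induction_on with
  | _ r ih =>
    have hout : ∀ (s i v : Int) (j : Nat), j < r → 1 ≤ i →
        2 * (r : Int) ≤ (999 + i) * (1000 - i) →
        hoTroGo (PySem.List.pyRange i 1000 1) s v (v + j + 1) = (altOuter r s i)[j]? := by
      intro s i v j hj hi hbud
      cases r with
      | zero => omega
      | succ r' =>
        have hi1000 : i < 1000 := by
          by_contra hge
          have hnp : (999 + i) * (1000 - i) ≤ 0 :=
            mul_nonpos_of_nonneg_of_nonpos (by omega) (by omega)
          push_cast at hbud; omega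
        rw [PySem.List.pyRange_one_cons (by omega : i < 1000)]
        cases j with
        | zero =>
          simp [hoTroGo, altOuter]
        | succ j' =>
          have hne : ¬ (v + 1 == v + (j' + 1 : Nat) + 1) := by
            simp only [beq_iff_eq]; push_cast; omega
          simp only [hoTroGo, altOuter, hne, Bool.false_eq_true, if_false]
          rw [show (v + ((j' + 1 : Nat) : Int) + 1) = (v + 1) + (j' : Nat) + 1 by push_cast; omega]
          have := (ih r' (by omega)).2 (i - 1).toNat
            ((PySem.Int.floordiv s i + 1) * i) i (v + 1) j' (by omega) hi
            (by
              have ht : ((i - 1).toNat : Int) = i - 1 := Int.toNat_of_nonneg (by omega)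
              have hid : (999 + i) * (1000 - i) = (1000 + i) * (999 - i) + 2 * i := by ring
              push_cast [ht] at hbud ⊢; linarith)
          simpa using this
    refine ⟨hout, ?_⟩
    intro k s i v j hj hi hbud
    cases k with
    | zero =>
      simp only [hoTroInner, altInner]
      rw [show (v + (j : Nat) + 1) = v + (j : Nat) + 1 from rfl]
      refine hout s (i + 1) v j hj (by omega) ?_
      have hid : (999 + (i + 1)) * (1000 - (i + 1)) = (1000 + i) * (999 - i) := by ring
      push_cast at hbud ⊢; linarith
    | succ k' =>
      cases r with
      | zero => omega
      | succ r' =>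
        cases j with
        | zero =>
          simp [hoTroInner, altInner]
        | succ j' =>
          have hne : ¬ (v + 1 == v + (j' + 1 : Nat) + 1) := by
            simp only [beq_iff_eq]; push_cast; omega
          simp only [hoTroInner, altInner, hne, Bool.false_eq_true, if_false]
          have := (ih r' (by omega)).2 k' (s + i) i (v + 1) j' (by omega) hi
            (by push_cast at hbud ⊢; linarith)
          rw [show (v + ((j' + 1 : Nat) : Int) + 1) = (v + 1) + (j' : Nat) + 1 by push_cast; omega]
          simpa using this

-- ===== VERDICT (by name: the statement is the Claim_ definition above) =====
theorem tao_danh_sach_quy_luat_1_spec : Claim_equal_tao_danh_sach_quy_luat_1 := by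
  intro number hdom hpre
  unfold Spec_tao_danh_sach_quy_luat_1 tao_danh_sach_quy_luat_1 tao_danh_sach_quy_luat_1_alt
  by_cases hle : number ≤ 0
  · rw [PySem.List.pyRange_one_eq_nil (by omega : number + 1 ≤ 1)]
    simp [hle]
  · have hle' : 1 ≤ number := by omega
    rw [if_neg (by omega)]
    set n : Nat := number.toNat with hn
    have hnum : (n : Int) = number := Int.toNat_of_nonneg (by omega)
    have hkey : ∀ j : Nat, j < n →
        hoTroGo (PySem.List.pyRange 1 1000 1) 1 0 ((0 : Int) + j + 1) = (altOuter n 1 1)[j]? := by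
      intro j hj
      exact (key_all n).1 1 1 0 j hj (by norm_num) (by have h5 : number ≤ 499500 := hpre; norm_num; omega)
    have hlenA : (altOuter n 1 1).length = n := (length_alt n).1 1 1
    have hA2 : altOuter n 1 1 = 2 :: altOuter (number - 1).toNat 2 2 := by
      have hn1 : n = (number - 1).toNat + 1 := by omega
      rw [hn1]
      norm_num [altOuter, altInner, PySem.Int.floordiv]
    have hlenR : (PySem.List.pyRange 1 (number + 1) 1).length = n := by
      rw [PySem.List.length_pyRange_one]; omega
    apply List.ext_getElem?
    intro j
    rw [List.getElem?_map]
    by_cases hj : j < n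
    · rw [List.getElem?_eq_getElem (by omega : j < (PySem.List.pyRange 1 (number + 1) 1).length)]
      rw [PySem.List.getElem_pyRange_one]
      cases j with
      | zero =>
        simp [hoTro]
      | succ j' =>
        have hne : ¬ (((1 : Int) + ((j' + 1 : Nat) : Int)) == 1) := by
          simp only [beq_iff_eq]; push_cast; omega
        simp only [Option.map_some, hoTro, hne, if_false, Bool.false_eq_true]
        have h1 := hkey (j' + 1) hj
        rw [show ((0 : Int) + ((j' + 1 : Nat) : Int) + 1) = 1 + ((j' + 1 : Nat) : Int) by push_cast; omega] at h1
        obtain ⟨val, hval⟩ : ∃ v, (altOuter n 1 1)[j' + 1]? = some v := by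
          rw [List.getElem?_eq_getElem (by omega : j' + 1 < (altOuter n 1 1).length)]
          exact ⟨_, rfl⟩
        rw [h1, hval]
        rw [hA2] at hval
        simp only [List.getElem?_cons_succ] at hval
        simp only [Option.getD_some]
        exact hval.symm
    · rw [List.getElem?_eq_none (by omega : (PySem.List.pyRange 1 (number + 1) 1).length ≤ j)]
      rw [List.getElem?_eq_none]
      · rfl
      · have : (altOuter (number - 1).toNat 2 2).length = (number - 1).toNat :=
          (length_alt _).1 2 2
        simp only [List.length_cons, this]; omega
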